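-- pv_equiv track=rewrite | github.com/Beremi/carcassonne_min_web_sim | dev_server.py | rot_port
-- ===== SOURCE A (Python) =====
-- PORT_ROT_CW = {
--     "Nw": "En",
--     "Ne": "Es",
--     "En": "Se",
--     "Es": "Sw",
--     "Se": "Ws",
--     "Sw": "Wn",
--     "Ws": "Nw",
--     "Wn": "Ne",
-- }
--
-- def rot_port(port, rot_deg):
--     steps = ((rot_deg % 360) + 360) % 360 // 90
--     q = port
--     for _ in range(steps):
--         if q in PORT_ROT_CW:
--             q = PORT_ROT_CW[q]
--         elif q == "N":
--             q = "E"
--         elif q == "E":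
--             q = "S"
--         elif q == "S":
--             q = "W"
--         elif q == "W":
--             q = "N"
--         else:
--             raise ValueError(f"Unknown port: {q}")
--     return q
-- ===== SOURCE B (Python) =====
-- _CYCLES = [["Nw", "En", "Se", "Ws"], ["Ne", "Es", "Sw", "Wn"], ["N", "E", "S", "W"]]
--
-- def rot_port(port, rot_deg):
--     steps = ((rot_deg % 360) + 360) % 360 // 90
--     if steps == 0:
--         return port
--     for cycle in _CYCLES:
--         if port in cycle:
--             return cycle[(cycle.index(port) + steps) % 4]
--     raise ValueError(f"Unknown port: {port}")
-- ===== Notes on version B (the rewrite author's own statement) =====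
-- stated objective: simpler
-- what changed: B replaces A's step-by-step repeated application of the rotation map by direct modular index arithmetic on the three explicit rotation orbits (cycle[(i+steps)%4]), returning in one lookup.
import Mathlib
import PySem

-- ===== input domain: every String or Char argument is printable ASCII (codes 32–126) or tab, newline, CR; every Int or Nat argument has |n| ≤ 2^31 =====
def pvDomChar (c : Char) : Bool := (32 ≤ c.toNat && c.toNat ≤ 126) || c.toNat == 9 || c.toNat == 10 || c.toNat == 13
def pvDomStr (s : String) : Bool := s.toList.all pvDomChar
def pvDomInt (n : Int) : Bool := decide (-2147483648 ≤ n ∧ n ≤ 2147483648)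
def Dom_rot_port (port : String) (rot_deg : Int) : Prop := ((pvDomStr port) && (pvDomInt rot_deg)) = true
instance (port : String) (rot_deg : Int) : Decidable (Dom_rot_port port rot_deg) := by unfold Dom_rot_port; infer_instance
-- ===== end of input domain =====

-- B replaces A's repeated application of the rotation map by modular index arithmetic on explicit orbit lists (simpler).
-- Pre_ excludes inputs where A raises ValueError (unknown port with steps > 0); B raises there too.

-- ===== PORT A =====
def portRotCW : PySem.Dict String String :=
  PySem.Dict.ofList [("Nw", "En"), ("Ne", "Es"), ("En", "Se"), ("Es", "Sw"),
                     ("Se", "Ws"), ("Sw", "Wn"), ("Ws", "Nw"), ("Wn", "Ne")]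

-- one iteration of A's loop body; the final 'else: raise ValueError' is unreachable inside Pre_
-- and is modelled by returning q unchanged.
def rotStepA (q : String) : String :=
  if portRotCW.contains q then (portRotCW.get? q).getD q
  else if q = "N" then "E"
  else if q = "E" then "S"
  else if q = "S" then "W"
  else if q = "W" then "N"
  else q

def rot_port (port : String) (rot_deg : Int) : String :=
  let steps := PySem.Int.floordiv (PySem.Int.mod (PySem.Int.mod rot_deg 360 + 360) 360) 90
  (PySem.List.pyRange 0 steps 1).foldl (fun q _ => rotStepA q) port

-- ===== PORT B =====
def pvCycles : List (List String) :=
  [["Nw", "En", "Se", "Ws"], ["Ne", "Es", "Sw", "Wn"], ["N", "E", "S", "W"]]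

-- B's for-loop over the cycles; 'raise ValueError' (no cycle matched) is unreachable inside Pre_
-- and is modelled by returning port unchanged.
def rotLookupB (port : String) (steps : Int) : List (List String) → String
  | [] => port
  | c :: rest =>
    match PySem.List.index? c port with
    | some i => (PySem.List.pyGet? c (PySem.Int.mod ((i : Int) + steps) 4)).getD port
    | none => rotLookupB port steps rest

def rot_port_alt (port : String) (rot_deg : Int) : String :=
  let steps := PySem.Int.floordiv (PySem.Int.mod (PySem.Int.mod rot_deg 360 + 360) 360) 90
  if steps = 0 then port
  else rotLookupB port steps pvCycles

-- ===== PRECONDITION & SPEC =====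
-- Pre_ excludes exactly the inputs on which A raises ValueError: an unrecognised port with steps > 0.
def Pre_rot_port (port : String) (rot_deg : Int) : Prop :=
  PySem.Int.floordiv (PySem.Int.mod (PySem.Int.mod rot_deg 360 + 360) 360) 90 = 0 ∨
  port ∈ (["Nw", "Ne", "En", "Es", "Se", "Sw", "Ws", "Wn", "N", "E", "S", "W"] : List String)
instance (port : String) (rot_deg : Int) : Decidable (Pre_rot_port port rot_deg) := by
  unfold Pre_rot_port; infer_instance

def pvWitness_rot_port : String × Int := ("Nw", 90)

def Spec_rot_port (port : String) (rot_deg : Int) (out : String) : Prop := out = rot_port_alt port rot_deg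
instance (port : String) (rot_deg : Int) (out : String) : Decidable (Spec_rot_port port rot_deg out) := by unfold Spec_rot_port; infer_instance

-- ===== CLAIM (what is proved, stated in full; the proofs are below) =====
def Claim_equal_rot_port : Prop := ∀ (port : String) (rot_deg : Int), Dom_rot_port port rot_deg → Pre_rot_port port rot_deg → Spec_rot_port port rot_deg (rot_port port rot_deg)

-- ===== LEMMAS AND PROOFS =====

-- the step count is always one of 0, 1, 2, 3
theorem steps_cases (rot_deg : Int) :
    PySem.Int.floordiv (PySem.Int.mod (PySem.Int.mod rot_deg 360 + 360) 360) 90 = 0 ∨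
    PySem.Int.floordiv (PySem.Int.mod (PySem.Int.mod rot_deg 360 + 360) 360) 90 = 1 ∨
    PySem.Int.floordiv (PySem.Int.mod (PySem.Int.mod rot_deg 360 + 360) 360) 90 = 2 ∨
    PySem.Int.floordiv (PySem.Int.mod (PySem.Int.mod rot_deg 360 + 360) 360) 90 = 3 := by
  have h1 : 0 ≤ PySem.Int.mod rot_deg 360 := PySem.Int.mod_nonneg _ (by norm_num)
  have h2 : PySem.Int.mod rot_deg 360 < 360 := PySem.Int.mod_lt _ (by norm_num)
  have h3 : 0 ≤ PySem.Int.mod (PySem.Int.mod rot_deg 360 + 360) 360 :=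
    PySem.Int.mod_nonneg _ (by norm_num)
  have h4 : PySem.Int.mod (PySem.Int.mod rot_deg 360 + 360) 360 < 360 :=
    PySem.Int.mod_lt _ (by norm_num)
  rw [PySem.Int.floordiv_eq_ediv_of_pos (by norm_num : (0:Int) < 90)]
  omega

-- agreement when the two loop bodies run a fixed positive number of times, for each valid port
theorem agree_on_valid (port : String) (steps : Int)
    (hp : port ∈ (["Nw", "Ne", "En", "Es", "Se", "Sw", "Ws", "Wn", "N", "E", "S", "W"] : List String))
    (hs : steps = 1 ∨ steps = 2 ∨ steps = 3) :
    (PySem.List.pyRange 0 steps 1).foldl (fun q _ => rotStepA q) port = rotLookupB port steps pvCycles := by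
  fin_cases hp <;> rcases hs with h | h | h <;> subst h <;> decide

theorem agree_branch (port : String) (s : Int) (hs : s = 1 ∨ s = 2 ∨ s = 3)
    (hp : port ∈ (["Nw", "Ne", "En", "Es", "Se", "Sw", "Ws", "Wn", "N", "E", "S", "W"] : List String)) :
    (PySem.List.pyRange 0 s 1).foldl (fun q _ => rotStepA q) port =
      if s = 0 then port else rotLookupB port s pvCycles := by
  rw [if_neg (by omega)]
  exact agree_on_valid port s hp hs

theorem rot_port_eq (port : String) (rot_deg : Int) (hpre : Pre_rot_port port rot_deg) :
    rot_port port rot_deg = rot_port_alt port rot_deg := by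
  unfold rot_port rot_port_alt
  unfold Pre_rot_port at hpre
  rcases steps_cases rot_deg with h | h | h | h <;> rw [h] <;> rw [h] at hpre
  · rfl
  all_goals {
    rcases hpre with hp | hp
    · exact absurd hp (by norm_num)
    · exact agree_branch port _ (by norm_num) hp }

-- ===== VERDICT (by name: the statement is the Claim_ definition above) =====
theorem rot_port_spec : Claim_equal_rot_port := by
  intro port rot_deg _ hpre
  exact rot_port_eq port rot_deg hpre
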